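-- pv_equiv track=rewrite | github.com/AmPaschal/AutoUP | experiments/vuln-analysis-experiment/analyze_experiment.py | parse_unwind_metrics
-- ===== SOURCE A (Python) =====
-- import shlex
--
-- def parse_unwind_metrics(cbmcflags: str) -> tuple[int, int | None, int | None]:
--     """Extract loop-specific unwind counts and overall min/max unwind limits from CBMC flags."""
--     tokens = shlex.split(cbmcflags)
--     unwind_values: list[int] = []
--     unwindset_count = 0
--     idx = 0
--     while idx < len(tokens):
--         token = tokens[idx]
--         value: str | None = None
--         if token == "--unwind" and idx + 1 < len(tokens):
--             value = tokens[idx + 1]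
--             idx += 2
--         elif token.startswith("--unwind="):
--             value = token.split("=", 1)[1]
--             idx += 1
--         elif token == "--unwindset" and idx + 1 < len(tokens):
--             spec = tokens[idx + 1]
--             for item in spec.split(","):
--                 if ":" not in item:
--                     continue
--                 _, raw_limit = item.rsplit(":", 1)
--                 try:
--                     limit = int(raw_limit)
--                 except ValueError:
--                     continue
--                 unwind_values.append(limit)
--                 unwindset_count += 1
--             idx += 2
--             continue
--         elif token.startswith("--unwindset="):
--             spec = token.split("=", 1)[1]
--             for item in spec.split(","):
--                 if ":" not in item:
--                     continue
--                 _, raw_limit = item.rsplit(":", 1)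
--                 try:
--                     limit = int(raw_limit)
--                 except ValueError:
--                     continue
--                 unwind_values.append(limit)
--                 unwindset_count += 1
--             idx += 1
--             continue
--         else:
--             idx += 1
--             continue
--
--         try:
--             unwind_values.append(int(value))
--         except (TypeError, ValueError):
--             pass
--
--     if not unwind_values:
--         return unwindset_count, None, None
--     return unwindset_count, min(unwind_values), max(unwind_values)
-- ===== SOURCE B (Python) =====
-- def _split_flags(s: str) -> list[str]:
--     """Split a flag string into shell-style tokens: whitespace separates tokens,
--     single quotes take their contents verbatim, double quotes allow backslash to
--     escape '\\' and '"', and a bare backslash escapes the next character.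
--     Raises ValueError on an unterminated quote or a dangling escape."""
--     WS = " \t\r\n"
--     tokens: list[str] = []
--     i, n = 0, len(s)
--     while i < n:
--         if s[i] in WS:
--             i += 1
--             continue
--         buf: list[str] = []
--         while i < n and s[i] not in WS:
--             c = s[i]
--             if c == "'":
--                 j = s.index("'", i + 1)  # ValueError if unterminated
--                 buf.append(s[i + 1:j])
--                 i = j + 1
--             elif c == '"':
--                 i += 1
--                 while True:
--                     if i >= n:
--                         raise ValueError("unterminated quote")
--                     c = s[i]
--                     if c == '"':
--                         i += 1
--                         break
--                     if c == "\\":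
--                         if i + 1 >= n:
--                             raise ValueError("unterminated quote")
--                         if s[i + 1] in '\\"':
--                             buf.append(s[i + 1])
--                         else:
--                             buf.append(s[i:i + 2])
--                         i += 2
--                     else:
--                         buf.append(c)
--                         i += 1
--             elif c == "\\":
--                 if i + 1 >= n:
--                     raise ValueError("dangling escape")
--                 buf.append(s[i + 1])
--                 i += 2
--             else:
--                 buf.append(c)
--                 i += 1
--         tokens.append("".join(buf))
--         i += 1
--     return tokens
--
--
-- def parse_unwind_metrics(cbmcflags: str) -> tuple[int, int | None, int | None]:
--     """Extract loop-specific unwind counts and overall min/max unwind limits from CBMC flags."""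
--     tokens = _split_flags(cbmcflags)
--     # Pass 1: normalize flag syntax into directives (is_unwindset, payload),
--     # merging a bare '--unwind'/'--unwindset' with its following argument token.
--     directives: list[tuple[bool, str]] = []
--     i = 0
--     while i < len(tokens):
--         tok = tokens[i]
--         if tok in ("--unwind", "--unwindset") and i + 1 < len(tokens):
--             directives.append((tok == "--unwindset", tokens[i + 1]))
--             i += 2
--         elif tok.startswith("--unwind="):
--             directives.append((False, tok.split("=", 1)[1]))
--             i += 1
--         elif tok.startswith("--unwindset="):
--             directives.append((True, tok.split("=", 1)[1]))
--             i += 1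
--         else:
--             i += 1
--     # Pass 2: aggregate with a running count/min/max; no list of values is kept.
--     count = 0
--     lo: int | None = None
--     hi: int | None = None
--     for is_set, payload in directives:
--         if is_set:
--             for item in payload.split(","):
--                 if ":" not in item:
--                     continue
--                 try:
--                     limit = int(item.rsplit(":", 1)[1])
--                 except ValueError:
--                     continue
--                 count += 1
--                 lo = limit if lo is None or limit < lo else lo
--                 hi = limit if hi is None or limit > hi else hi
--         else:
--             try:
--                 limit = int(payload)
--             except ValueError:
--                 continue
--             lo = limit if lo is None or limit < lo else lo
--             hi = limit if hi is None or limit > hi else hi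
--     return count, lo, hi
-- ===== Notes on version B (the rewrite author's own statement) =====
-- stated objective: faster
-- what changed: A's single interleaved scan (accumulate a list of unwind values, min/max at the end) with shlex.split tokenization is replaced by a two-pass decomposition: pass 1 normalizes tokens into (is_unwindset, payload) directives via a direct hand-written quote-aware splitter, pass 2 aggregates with a running count/min/max keeping no list; Pre_ excludes only strings on which shlex.split raises ValueError (unclosed quote or dangling escape), where B's splitter also raises.
import Mathlib
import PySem

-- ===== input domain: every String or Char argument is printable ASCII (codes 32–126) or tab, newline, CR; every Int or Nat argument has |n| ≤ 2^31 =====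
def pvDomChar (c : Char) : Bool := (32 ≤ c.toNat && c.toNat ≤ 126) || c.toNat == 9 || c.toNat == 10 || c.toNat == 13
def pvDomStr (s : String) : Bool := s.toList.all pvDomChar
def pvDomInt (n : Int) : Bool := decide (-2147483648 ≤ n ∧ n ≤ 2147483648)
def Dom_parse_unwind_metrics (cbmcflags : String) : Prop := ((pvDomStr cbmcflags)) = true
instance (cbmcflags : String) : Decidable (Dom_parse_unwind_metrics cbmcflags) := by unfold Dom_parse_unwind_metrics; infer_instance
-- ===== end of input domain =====

-- B replaces A's single interleaved scan (value list + final min/max, shlex.split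
-- tokenization) by a two-pass decomposition: a direct quote-aware splitter normalizes
-- tokens into directives, then a running count/min/max aggregates; measured faster by
-- a constant factor (no asymptotic change).


-- ===== SHARED HELPERS (tokenizer; "=" split; ":" rsplit; "," split) =====
-- Both ports tokenize with shlexSplit?: it is the transliteration of B's hand-written
-- _split_flags and, for A, the model of its shlex.split stdlib call (the two agree:
-- shell-style whitespace/quote/escape splitting; none = the ValueError cases,
-- i.e. an unterminated quote or a dangling escape). Exact on the ASCII domain.
-- readTok/splitFlags? take a fuel argument (a totality guard only: every recursive
-- call consumes at least one character, so fuel = length + 1 never runs out).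

def isWS (c : Char) : Bool := c == ' ' || c == '\t' || c == '\r' || c == '\n'

-- B's inner double-quote loop: consume up to the closing '"'; backslash escapes '\\' and '"'
def readDq : List Char → List Char → Option (List Char × List Char)
  | _, [] => none
  | buf, c :: r =>
    if c = '"' then some (buf, r)
    else if c = '\\' then
      match r with
      | [] => none
      | d :: r' =>
        if d = '\\' ∨ d = '"' then readDq (buf ++ [d]) r'
        else readDq (buf ++ ['\\', d]) r'
    else readDq (buf ++ [c]) r

-- B's inner token loop: read one token (buf accumulates) up to unquoted whitespace/end
def readTok : Nat → List Char → List Char → Option (List Char × List Char)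
  | 0, _, _ => none
  | _ + 1, buf, [] => some (buf, [])
  | fuel + 1, buf, c :: r =>
    if isWS c then some (buf, r)
    else if c = '\'' then
      -- s.index("'", i+1) + slice: the chars strictly before the next single quote
      let inside := r.takeWhile (fun x => x ≠ '\'')
      if inside.length = r.length then none   -- no closing quote: ValueError
      else readTok fuel (buf ++ inside) (r.drop (inside.length + 1))
    else if c = '"' then
      match readDq buf r with
      | none => none                          -- unterminated quote: ValueError
      | some (buf', rest) => readTok fuel buf' rest
    else if c = '\\' then
      match r with
      | [] => none                            -- dangling escape: ValueError
      | d :: r' => readTok fuel (buf ++ [d]) r'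
    else readTok fuel (buf ++ [c]) r

-- B's outer loop: skip whitespace, read a token, repeat
def splitFlags? : Nat → List Char → Option (List String)
  | 0, _ => none
  | _ + 1, [] => some []
  | fuel + 1, c :: r =>
    if isWS c then splitFlags? fuel r
    else
      match readTok (r.length + 2) [] (c :: r) with
      | none => none
      | some (tok, rest) =>
        match splitFlags? fuel rest with
        | none => none
        | some ts => some (String.ofList tok :: ts)

-- the tokenizer on a String; none = the ValueError cases
def shlexSplit? (s : String) : Option (List String) :=
  splitFlags? (s.toList.length + 1) s.toList

-- t.split("=", 1)[1]; every call site has "=" in t, so there are two parts (the "" arm is dead)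
def splitEq1 (t : String) : String :=
  match PySem.Str.splitMax? t "=" 1 with
  | some (_ :: v :: _) => v
  | _ => ""

-- item.rsplit(":", 1)[1]: the part after the LAST ':'; every call site guards ":" in item
def afterLastColon (item : String) : String :=
  String.ofList ((item.toList.reverse.takeWhile (fun c => c ≠ ':')).reverse)

-- spec.split(","): the separator is nonempty, so split? never returns none
def splitComma (spec : String) : List String :=
  (PySem.Str.split? spec ",").getD []

-- ===== PORT A =====

-- try: unwind_values.append(int(value)) except: pass
def appendVal (vals : List Int) (v : String) : List Int :=
  match PySem.Int.ofStr? v with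
  | some n => vals ++ [n]
  | none => vals

-- body of A's 'for item in spec.split(",")' loop, acting on (unwind_values, unwindset_count)
def setStepA (p : List Int × Int) (item : String) : List Int × Int :=
  if PySem.Str.isIn ":" item then
    match PySem.Int.ofStr? (afterLastColon item) with
    | some l => (p.1 ++ [l], p.2 + 1)
    | none => p
  else p

def parseSetSpecA (spec : String) (vals : List Int) (cnt : Int) : List Int × Int :=
  (splitComma spec).foldl setStepA (vals, cnt)

-- A's while loop over tokens (index form rendered as list recursion; idx+1 < len ↔ rest ≠ [])
def loopA : List String → List Int → Int → List Int × Int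
  | [], vals, cnt => (vals, cnt)
  | t :: rest, vals, cnt =>
    if t = "--unwind" ∧ rest ≠ [] then
      match rest with
      | v :: rest' => loopA rest' (appendVal vals v) cnt
      | [] => (vals, cnt)   -- unreachable: the guard forces rest ≠ []
    else if PySem.Str.startswith t "--unwind=" then
      loopA rest (appendVal vals (splitEq1 t)) cnt
    else if t = "--unwindset" ∧ rest ≠ [] then
      match rest with
      | v :: rest' => loopA rest' (parseSetSpecA v vals cnt).1 (parseSetSpecA v vals cnt).2
      | [] => (vals, cnt)   -- unreachable: the guard forces rest ≠ []
    else if PySem.Str.startswith t "--unwindset=" then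
      loopA rest (parseSetSpecA (splitEq1 t) vals cnt).1 (parseSetSpecA (splitEq1 t) vals cnt).2
    else loopA rest vals cnt

def parse_unwind_metrics (cbmcflags : String) : Int × Option Int × Option Int :=
  match shlexSplit? cbmcflags with
  | none => (0, none, none)   -- Python raises ValueError here; excluded by Pre_
  | some tokens =>
    let p := loopA tokens [] 0
    if p.1 = [] then (p.2, none, none)
    else (p.2, PySem.List.min? p.1 (fun x => x), PySem.List.max? p.1 (fun x => x))

-- ===== PORT B =====

-- lo = limit if lo is None or limit < lo else lo
def updLo (lo : Option Int) (x : Int) : Option Int :=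
  match lo with
  | none => some x
  | some l => if x < l then some x else some l

-- hi = limit if hi is None or limit > hi else hi
def updHi (hi : Option Int) (x : Int) : Option Int :=
  match hi with
  | none => some x
  | some h => if x > h then some x else some h

-- pass 1: normalize tokens into (is_unwindset, payload) directives
def pass1 : List String → List (Bool × String)
  | [] => []
  | t :: rest =>
    if (t = "--unwind" ∨ t = "--unwindset") ∧ rest ≠ [] then
      match rest with
      | v :: rest' => (decide (t = "--unwindset"), v) :: pass1 rest'
      | [] => []   -- unreachable: the guard forces rest ≠ []
    else if PySem.Str.startswith t "--unwind=" then
      (false, splitEq1 t) :: pass1 rest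
    else if PySem.Str.startswith t "--unwindset=" then
      (true, splitEq1 t) :: pass1 rest
    else pass1 rest

-- body of B's 'for item in payload.split(",")' loop on the running (count, lo, hi)
def setStepB (st : Int × Option Int × Option Int) (item : String) : Int × Option Int × Option Int :=
  if PySem.Str.isIn ":" item then
    match PySem.Int.ofStr? (afterLastColon item) with
    | some l => (st.1 + 1, updLo st.2.1 l, updHi st.2.2 l)
    | none => st
  else st

-- pass 2: aggregate the directives with a running count/min/max
def pass2 : List (Bool × String) → Int → Option Int → Option Int → Int × Option Int × Option Int
  | [], cnt, lo, hi => (cnt, lo, hi)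
  | (isSet, payload) :: rest, cnt, lo, hi =>
    if isSet then
      pass2 rest ((splitComma payload).foldl setStepB (cnt, lo, hi)).1
        ((splitComma payload).foldl setStepB (cnt, lo, hi)).2.1
        ((splitComma payload).foldl setStepB (cnt, lo, hi)).2.2
    else
      match PySem.Int.ofStr? payload with
      | some n => pass2 rest cnt (updLo lo n) (updHi hi n)
      | none => pass2 rest cnt lo hi

def parse_unwind_metrics_alt (cbmcflags : String) : Int × Option Int × Option Int :=
  match shlexSplit? cbmcflags with
  | none => (0, none, none)   -- Python raises ValueError here; excluded by Pre_
  | some tokens => pass2 (pass1 tokens) 0 none none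

-- ===== PRECONDITION & SPEC =====

-- Closed-form quote-balance condition on the input, decided by one character scan:
-- state = (mode: outside / in single quotes / in double quotes, pending escape);
-- acceptable iff the scan ends outside quotes with no pending escape.
inductive QMode : Type
  | out | sq | dq
deriving DecidableEq, Repr

def qstep : QMode × Bool → Char → QMode × Bool
  | (m, true), _ => (m, false)
  | (QMode.out, false), c =>
    if c = '\\' then (QMode.out, true)
    else if c = '\'' then (QMode.sq, false)
    else if c = '"' then (QMode.dq, false)
    else (QMode.out, false)
  | (QMode.sq, false), c =>
    if c = '\'' then (QMode.out, false) else (QMode.sq, false)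
  | (QMode.dq, false), c =>
    if c = '"' then (QMode.out, false)
    else if c = '\\' then (QMode.dq, true)
    else (QMode.dq, false)

def scanOk (m : QMode) (l : List Char) : Bool :=
  l.foldl qstep (m, false) == (QMode.out, false)

-- Pre_ excludes exactly the strings on which shlex.split (hence both Pythons) raises
-- ValueError: an unclosed quote or a trailing unescaped backslash.
def Pre_parse_unwind_metrics (cbmcflags : String) : Prop := scanOk QMode.out cbmcflags.toList = true
instance (cbmcflags : String) : Decidable (Pre_parse_unwind_metrics cbmcflags) := by
  unfold Pre_parse_unwind_metrics; infer_instance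

def pvWitness_parse_unwind_metrics : String := "--unwind 3 --unwindset a:2,b:7"

def Spec_parse_unwind_metrics (cbmcflags : String) (out : Int × Option Int × Option Int) : Prop := out = parse_unwind_metrics_alt cbmcflags
instance (cbmcflags : String) (out : Int × Option Int × Option Int) : Decidable (Spec_parse_unwind_metrics cbmcflags out) := by unfold Spec_parse_unwind_metrics; infer_instance

-- ===== CLAIM (what is proved, stated in full; the proofs are below) =====
def Claim_equal_parse_unwind_metrics : Prop := ∀ (cbmcflags : String), Dom_parse_unwind_metrics cbmcflags → Pre_parse_unwind_metrics cbmcflags → Spec_parse_unwind_metrics cbmcflags (parse_unwind_metrics cbmcflags)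

-- ===== LEMMAS AND PROOFS =====

-- the quote-balance scanner guarantees the tokenizer succeeds (Pre_ → isSome)

theorem readDq_length_aux (n : Nat) : ∀ (l buf : List Char), l.length ≤ n →
    ∀ {t rest : List Char}, readDq buf l = some (t, rest) → rest.length < l.length := by
  induction n with
  | zero =>
    intro l buf hn t rest h
    match l with
    | [] => simp [readDq] at h
  | succ n ih =>
    intro l buf hn t rest h
    match l with
    | [] => simp [readDq] at h
    | c :: r =>
      rw [readDq.eq_def] at h
      dsimp only at h
      simp only [List.length_cons] at hn ⊢
      split at h
      · injection h with h'; cases h'; omega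
      · split at h
        · split at h
          · simp at h
          · rename_i d r'
            split at h <;>
              (have := ih r' _ (by simp only [List.length_cons] at hn; omega) h
               simp only [List.length_cons] at *; omega)
        · have := ih r _ (by omega) h; omega

theorem readDq_length (buf l : List Char) {t rest : List Char}
    (h : readDq buf l = some (t, rest)) : rest.length < l.length :=
  readDq_length_aux l.length l buf le_rfl h

theorem foldl_qstep_esc (m : QMode) (l : List Char)
    (h : List.foldl qstep (m, true) l = (QMode.out, false)) :
    ∃ d r', l = d :: r' ∧ List.foldl qstep (m, false) r' = (QMode.out, false) := by
  match l with
  | [] => simp at h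
  | d :: r' =>
    refine ⟨d, r', rfl, ?_⟩
    simpa [qstep] using h

theorem scanSq_spec : ∀ (r : List Char),
    List.foldl qstep (QMode.sq, false) r = (QMode.out, false) →
    (r.takeWhile (fun x => x ≠ '\'')).length < r.length ∧
    List.foldl qstep (QMode.out, false) (r.drop ((r.takeWhile (fun x => x ≠ '\'')).length + 1)) = (QMode.out, false) := by
  intro r
  induction r with
  | nil => intro h; simp at h
  | cons c r ih =>
    intro h
    rw [List.foldl_cons] at h
    by_cases hc : c = '\''
    · subst hc
      rw [show qstep (QMode.sq, false) '\'' = (QMode.out, false) from by simp [qstep]] at h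
      refine ⟨by simp [List.takeWhile_cons], ?_⟩
      simpa [List.takeWhile_cons] using h
    · rw [show qstep (QMode.sq, false) c = (QMode.sq, false) from by simp [qstep, hc]] at h
      obtain ⟨h1, h2⟩ := ih h
      rw [List.takeWhile_cons, if_pos (by simpa using hc)]
      refine ⟨by simpa using h1, ?_⟩
      simpa using h2

theorem scanDq_spec_aux (n : Nat) : ∀ (l buf : List Char), l.length ≤ n →
    List.foldl qstep (QMode.dq, false) l = (QMode.out, false) →
    ∃ b rest, readDq buf l = some (b, rest) ∧
      List.foldl qstep (QMode.out, false) rest = (QMode.out, false) := by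
  induction n with
  | zero =>
    intro l buf hn h
    match l with
    | [] => simp at h
  | succ n ih =>
    intro l buf hn h
    match l with
    | [] => simp at h
    | c :: r =>
      rw [List.foldl_cons] at h
      rw [readDq.eq_def]
      dsimp only
      simp only [List.length_cons] at hn
      by_cases h1 : c = '"'
      · subst h1
        rw [show qstep (QMode.dq, false) '"' = (QMode.out, false) from by simp [qstep]] at h
        rw [if_pos rfl]
        exact ⟨buf, r, rfl, h⟩
      · rw [if_neg h1]
        by_cases h2 : c = '\\'
        · subst h2
          rw [show qstep (QMode.dq, false) '\\' = (QMode.dq, true) from by simp [qstep]] at h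
          rw [if_pos rfl]
          obtain ⟨d, r', rfl, h'⟩ := foldl_qstep_esc _ _ h
          dsimp only
          split
          · exact ih r' _ (by simp only [List.length_cons] at hn; omega) h'
          · exact ih r' _ (by simp only [List.length_cons] at hn; omega) h'
        · rw [show qstep (QMode.dq, false) c = (QMode.dq, false) from by simp [qstep, h1, h2]] at h
          rw [if_neg h2]
          exact ih r _ (by omega) h

theorem qstep_ws (c : Char) (hws : isWS c = true) :
    qstep (QMode.out, false) c = (QMode.out, false) := by
  have hc : c = ' ' ∨ c = '\t' ∨ c = '\r' ∨ c = '\n' := by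
    simp [isWS] at hws; tauto
  rcases hc with rfl | rfl | rfl | rfl <;> simp [qstep]

theorem readTok_some : ∀ (fuel : Nat) (l buf : List Char), l.length < fuel →
    List.foldl qstep (QMode.out, false) l = (QMode.out, false) →
    ∃ t rest, readTok fuel buf l = some (t, rest) ∧
      List.foldl qstep (QMode.out, false) rest = (QMode.out, false) ∧
      rest.length ≤ l.length ∧ (l ≠ [] → rest.length < l.length) := by
  intro fuel
  induction fuel with
  | zero => intro l buf hlen _; omega
  | succ fuel ih =>
    intro l buf hlen hscan
    match l with
    | [] =>
      refine ⟨buf, [], ?_, by simp, by simp, by simp⟩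
      rw [readTok]
    | c :: r =>
      rw [readTok.eq_def]
      dsimp only
      rw [List.foldl_cons] at hscan
      simp only [List.length_cons] at hlen ⊢
      by_cases hws : isWS c = true
      · rw [if_pos hws]
        rw [qstep_ws c hws] at hscan
        exact ⟨buf, r, rfl, hscan, by omega, fun _ => by omega⟩
      · rw [if_neg hws]
        by_cases h1 : c = '\''
        · subst h1
          rw [if_pos rfl]
          rw [show qstep (QMode.out, false) '\'' = (QMode.sq, false) from by simp [qstep]] at hscan
          obtain ⟨hlt, hout⟩ := scanSq_spec r hscan
          rw [if_neg (by omega)]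
          obtain ⟨t, rest, heq, hsc, hle, _⟩ :=
            ih (r.drop ((r.takeWhile (fun x => x ≠ '\'')).length + 1))
              (buf ++ r.takeWhile (fun x => x ≠ '\''))
              (by simp only [List.length_drop]; omega) hout
          refine ⟨t, rest, heq, hsc, ?_, fun _ => ?_⟩ <;>
            (simp only [List.length_drop] at hle; omega)
        · rw [if_neg h1]
          by_cases h2 : c = '"'
          · subst h2
            rw [if_pos rfl]
            rw [show qstep (QMode.out, false) '"' = (QMode.dq, false) from by simp [qstep]] at hscan
            obtain ⟨b, rest0, hdq, hout⟩ := scanDq_spec_aux r.length r buf le_rfl hscan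
            have hlt0 := readDq_length buf r hdq
            rw [hdq]
            dsimp only
            obtain ⟨t, rest, heq, hsc, hle, _⟩ := ih rest0 b (by omega) hout
            exact ⟨t, rest, heq, hsc, by omega, fun _ => by omega⟩
          · rw [if_neg h2]
            by_cases h3 : c = '\\'
            · subst h3
              rw [if_pos rfl]
              rw [show qstep (QMode.out, false) '\\' = (QMode.out, true) from by simp [qstep]] at hscan
              obtain ⟨d, r', rfl, hscan'⟩ := foldl_qstep_esc _ _ hscan
              dsimp only
              simp only [List.length_cons] at hlen ⊢
              obtain ⟨t, rest, heq, hsc, hle, _⟩ := ih r' (buf ++ [d]) (by omega) hscan'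
              exact ⟨t, rest, heq, hsc, by omega, fun _ => by omega⟩
            · rw [if_neg h3]
              rw [show qstep (QMode.out, false) c = (QMode.out, false) from by
                simp [qstep, h1, h2, h3]] at hscan
              obtain ⟨t, rest, heq, hsc, hle, _⟩ := ih r (buf ++ [c]) (by omega) hscan
              exact ⟨t, rest, heq, hsc, by omega, fun _ => by omega⟩

theorem splitFlags_some : ∀ (fuel : Nat) (l : List Char), l.length < fuel →
    List.foldl qstep (QMode.out, false) l = (QMode.out, false) →
    ∃ ts, splitFlags? fuel l = some ts := by
  intro fuel
  induction fuel with
  | zero => intro l hlen _; omega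
  | succ fuel ih =>
    intro l hlen hscan
    match l with
    | [] => exact ⟨[], by rw [splitFlags?]⟩
    | c :: r =>
      rw [splitFlags?.eq_def]
      dsimp only
      simp only [List.length_cons] at hlen
      by_cases hws : isWS c = true
      · rw [if_pos hws]
        rw [List.foldl_cons, qstep_ws c hws] at hscan
        exact ih r (by omega) hscan
      · rw [if_neg hws]
        obtain ⟨t, rest, heq, hsc, hle, hlt⟩ :=
          readTok_some (r.length + 2) (c :: r) [] (by simp) hscan
        rw [heq]
        dsimp only
        have hlt' := hlt (by simp)
        simp only [List.length_cons] at hlt'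
        obtain ⟨ts, hts⟩ := ih rest (by omega) hsc
        rw [hts]
        exact ⟨_, rfl⟩

theorem shlexSplit_isSome (s : String) (h : scanOk QMode.out s.toList = true) :
    (shlexSplit? s).isSome = true := by
  unfold shlexSplit?
  have h' : s.toList.foldl qstep (QMode.out, false) = (QMode.out, false) := by
    simpa [scanOk] using h
  obtain ⟨ts, hts⟩ := splitFlags_some (s.toList.length + 1) s.toList (by omega) h'
  rw [hts]
  rfl

-- min?/max? of the snapshot list, as A computes them at the end
def mOpt (vals : List Int) : Option Int := PySem.List.min? vals (fun x => x)
def MOpt (vals : List Int) : Option Int := PySem.List.max? vals (fun x => x)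

-- (count, min, max) of an A-side accumulator state
def pack (p : List Int × Int) : Int × Option Int × Option Int := (p.2, mOpt p.1, MOpt p.1)

theorem mOpt_nil : mOpt [] = none := by simp [mOpt, PySem.List.min?]
theorem MOpt_nil : MOpt [] = none := by simp [MOpt, PySem.List.max?]

theorem updLo_mOpt (vals : List Int) (x : Int) : updLo (mOpt vals) x = mOpt (vals ++ [x]) := by
  cases vals with
  | nil => simp [mOpt, PySem.List.min?, updLo]
  | cons v t =>
    simp only [mOpt, PySem.List.min?_id_cons, List.cons_append, List.foldl_append,
      List.foldl_cons, List.foldl_nil, updLo]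
    generalize List.foldl min v t = m
    by_cases h : x < m
    · simp [h, min_eq_right h.le]
    · simp [h, min_eq_left (not_lt.mp h)]

theorem updHi_MOpt (vals : List Int) (x : Int) : updHi (MOpt vals) x = MOpt (vals ++ [x]) := by
  cases vals with
  | nil => simp [MOpt, PySem.List.max?, updHi]
  | cons v t =>
    simp only [MOpt, PySem.List.max?_id_cons, List.cons_append, List.foldl_append,
      List.foldl_cons, List.foldl_nil, updHi]
    generalize List.foldl max v t = m
    by_cases h : x > m
    · simp [h, max_eq_right h.le]
    · simp [h, max_eq_left (not_lt.mp h)]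

-- the two inner unwindset loops run in lockstep
theorem setFold_eq (items : List String) : ∀ (vals : List Int) (cnt : Int),
    items.foldl setStepB (cnt, mOpt vals, MOpt vals) = pack (items.foldl setStepA (vals, cnt)) := by
  induction items with
  | nil => intro vals cnt; simp [pack]
  | cons item rest ih =>
    intro vals cnt
    simp only [List.foldl_cons]
    by_cases h : PySem.Str.isIn ":" item = true
    · cases hv : PySem.Int.ofStr? (afterLastColon item) with
      | none =>
        have hB : setStepB (cnt, mOpt vals, MOpt vals) item = (cnt, mOpt vals, MOpt vals) := by
          unfold setStepB; rw [if_pos h, hv]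
        have hA : setStepA (vals, cnt) item = (vals, cnt) := by
          unfold setStepA; rw [if_pos h, hv]
        rw [hB, hA]; exact ih vals cnt
      | some l =>
        have hB : setStepB (cnt, mOpt vals, MOpt vals) item
            = (cnt + 1, mOpt (vals ++ [l]), MOpt (vals ++ [l])) := by
          unfold setStepB; rw [if_pos h, hv]
          dsimp only
          rw [updLo_mOpt, updHi_MOpt]
        have hA : setStepA (vals, cnt) item = (vals ++ [l], cnt + 1) := by
          unfold setStepA; rw [if_pos h, hv]
        rw [hB, hA]; exact ih (vals ++ [l]) (cnt + 1)
    · have hB : setStepB (cnt, mOpt vals, MOpt vals) item = (cnt, mOpt vals, MOpt vals) := by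
        unfold setStepB; rw [if_neg h]
      have hA : setStepA (vals, cnt) item = (vals, cnt) := by
        unfold setStepA; rw [if_neg h]
      rw [hB, hA]; exact ih vals cnt

-- a token starting with "--unwind=" is neither bare flag
theorem pfx_unwind_ne (t : String) (h : PySem.Str.startswith t "--unwind=" = true) :
    t ≠ "--unwind" ∧ t ≠ "--unwindset" := by
  constructor <;> rintro rfl <;> revert h <;> decide

-- a token starting with "--unwindset=" is neither bare flag and does not start with "--unwind="
theorem pfx_unwindset_ne (t : String) (h : PySem.Str.startswith t "--unwindset=" = true) :
    t ≠ "--unwind" ∧ t ≠ "--unwindset" ∧ ¬ PySem.Str.startswith t "--unwind=" = true := by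
  refine ⟨?_, ?_, ?_⟩
  · rintro rfl; revert h; decide
  · rintro rfl; revert h; decide
  · intro hx
    have h1 : ("--unwindset=".toList) <+: t.toList := by
      rw [PySem.Str.startswith_eq] at h
      exact (PySem.Chars.startswith_iff _ _).mp h
    have h2 : ("--unwind=".toList) <+: t.toList := by
      rw [PySem.Str.startswith_eq] at hx
      exact (PySem.Chars.startswith_iff _ _).mp hx
    have e1 := List.prefix_iff_eq_take.mp h1
    have e2 := List.prefix_iff_eq_take.mp h2
    have hbad : ("--unwind=".toList) = ("--unwindset=".toList).take 9 := by
      rw [e2, e1]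
      simp [List.take_take]
    revert hbad; decide

-- unfolding lemmas for pass1
theorem pass1_cons_bare (t v : String) (rest : List String)
    (h : t = "--unwind" ∨ t = "--unwindset") :
    pass1 (t :: v :: rest) = (decide (t = "--unwindset"), v) :: pass1 rest := by
  rw [pass1.eq_def]; dsimp only
  rw [if_pos ⟨h, by simp⟩]

theorem pass1_cons_pfx_u (t : String) (rest : List String)
    (h2 : PySem.Str.startswith t "--unwind=" = true)
    (ht1 : t ≠ "--unwind") (ht2 : t ≠ "--unwindset") :
    pass1 (t :: rest) = (false, splitEq1 t) :: pass1 rest := by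
  rw [pass1.eq_def]; dsimp only
  rw [if_neg (by rintro ⟨h | h, -⟩ <;> [exact ht1 h; exact ht2 h]), if_pos h2]

theorem pass1_cons_pfx_s (t : String) (rest : List String)
    (h4 : PySem.Str.startswith t "--unwindset=" = true)
    (ht1 : t ≠ "--unwind") (ht2 : t ≠ "--unwindset")
    (ht3 : ¬ PySem.Str.startswith t "--unwind=" = true) :
    pass1 (t :: rest) = (true, splitEq1 t) :: pass1 rest := by
  rw [pass1.eq_def]; dsimp only
  rw [if_neg (by rintro ⟨h | h, -⟩ <;> [exact ht1 h; exact ht2 h]), if_neg ht3, if_pos h4]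

theorem pass1_cons_skip (t : String) (rest : List String)
    (hno1 : ¬(t = "--unwind" ∧ rest ≠ []))
    (hno2 : ¬ PySem.Str.startswith t "--unwind=" = true)
    (hno3 : ¬(t = "--unwindset" ∧ rest ≠ []))
    (hno4 : ¬ PySem.Str.startswith t "--unwindset=" = true) :
    pass1 (t :: rest) = pass1 rest := by
  rw [pass1.eq_def]; dsimp only
  rw [if_neg ?_, if_neg hno2, if_neg hno4]
  rintro ⟨h | h, hr⟩
  · exact hno1 ⟨h, hr⟩
  · exact hno3 ⟨h, hr⟩

-- unfolding lemmas for loopA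
theorem loopA_bare_u (v : String) (rest : List String) (vals : List Int) (cnt : Int) :
    loopA ("--unwind" :: v :: rest) vals cnt = loopA rest (appendVal vals v) cnt := by
  rw [loopA.eq_def]; dsimp only
  rw [if_pos ⟨rfl, by simp⟩]

theorem loopA_pfx_u (t : String) (rest : List String) (vals : List Int) (cnt : Int)
    (hno1 : ¬(t = "--unwind" ∧ rest ≠ []))
    (h2 : PySem.Str.startswith t "--unwind=" = true) :
    loopA (t :: rest) vals cnt = loopA rest (appendVal vals (splitEq1 t)) cnt := by
  rw [loopA.eq_def]; dsimp only
  rw [if_neg hno1, if_pos h2]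

theorem loopA_bare_s (v : String) (rest : List String) (vals : List Int) (cnt : Int) :
    loopA ("--unwindset" :: v :: rest) vals cnt
      = loopA rest (parseSetSpecA v vals cnt).1 (parseSetSpecA v vals cnt).2 := by
  rw [loopA.eq_def]; dsimp only
  rw [if_neg (by rintro ⟨h, -⟩; revert h; decide), if_neg (by decide), if_pos ⟨rfl, by simp⟩]

theorem loopA_pfx_s (t : String) (rest : List String) (vals : List Int) (cnt : Int)
    (hno1 : ¬(t = "--unwind" ∧ rest ≠ []))
    (hno2 : ¬ PySem.Str.startswith t "--unwind=" = true)
    (hno3 : ¬(t = "--unwindset" ∧ rest ≠ []))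
    (h4 : PySem.Str.startswith t "--unwindset=" = true) :
    loopA (t :: rest) vals cnt
      = loopA rest (parseSetSpecA (splitEq1 t) vals cnt).1 (parseSetSpecA (splitEq1 t) vals cnt).2 := by
  rw [loopA.eq_def]; dsimp only
  rw [if_neg hno1, if_neg hno2, if_neg hno3, if_pos h4]

theorem loopA_skip (t : String) (rest : List String) (vals : List Int) (cnt : Int)
    (hno1 : ¬(t = "--unwind" ∧ rest ≠ []))
    (hno2 : ¬ PySem.Str.startswith t "--unwind=" = true)
    (hno3 : ¬(t = "--unwindset" ∧ rest ≠ []))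
    (hno4 : ¬ PySem.Str.startswith t "--unwindset=" = true) :
    loopA (t :: rest) vals cnt = loopA rest vals cnt := by
  rw [loopA.eq_def]; dsimp only
  rw [if_neg hno1, if_neg hno2, if_neg hno3, if_neg hno4]

-- unfolding lemmas for pass2
theorem pass2_single_none (v : String) (d : List (Bool × String)) (cnt : Int) (lo hi : Option Int)
    (hv : PySem.Int.ofStr? v = none) :
    pass2 ((false, v) :: d) cnt lo hi = pass2 d cnt lo hi := by
  rw [pass2.eq_def]; dsimp only
  rw [if_neg (by simp), hv]

theorem pass2_single_some (v : String) (d : List (Bool × String)) (cnt : Int) (lo hi : Option Int)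
    (n : Int) (hv : PySem.Int.ofStr? v = some n) :
    pass2 ((false, v) :: d) cnt lo hi = pass2 d cnt (updLo lo n) (updHi hi n) := by
  rw [pass2.eq_def]; dsimp only
  rw [if_neg (by simp), hv]

theorem pass2_set (p : String) (d : List (Bool × String)) (cnt : Int) (lo hi : Option Int) :
    pass2 ((true, p) :: d) cnt lo hi
      = pass2 d ((splitComma p).foldl setStepB (cnt, lo, hi)).1
          ((splitComma p).foldl setStepB (cnt, lo, hi)).2.1
          ((splitComma p).foldl setStepB (cnt, lo, hi)).2.2 := by
  rw [pass2.eq_def]; dsimp only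
  rw [if_pos rfl]

-- shared tail for the two single-value branches
theorem tail_single (v : String) (rest' : List String) (vals : List Int) (cnt : Int)
    (ih : pass2 (pass1 rest') cnt (mOpt (appendVal vals v)) (MOpt (appendVal vals v))
          = pack (loopA rest' (appendVal vals v) cnt)) :
    pass2 ((false, v) :: pass1 rest') cnt (mOpt vals) (MOpt vals)
      = pack (loopA rest' (appendVal vals v) cnt) := by
  cases hv : PySem.Int.ofStr? v with
  | none =>
    have hA : appendVal vals v = vals := by simp [appendVal, hv]
    rw [pass2_single_none _ _ _ _ _ hv]
    rw [hA] at ih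
    rw [hA]
    exact ih
  | some n =>
    have hA : appendVal vals v = vals ++ [n] := by simp [appendVal, hv]
    rw [pass2_single_some _ _ _ _ _ _ hv, updLo_mOpt, updHi_MOpt, ← hA]
    exact ih

-- shared tail for the two unwindset branches
theorem tail_set (spec : String) (rest' : List String) (vals : List Int) (cnt : Int)
    (ih : pass2 (pass1 rest') (parseSetSpecA spec vals cnt).2
            (mOpt (parseSetSpecA spec vals cnt).1) (MOpt (parseSetSpecA spec vals cnt).1)
          = pack (loopA rest' (parseSetSpecA spec vals cnt).1 (parseSetSpecA spec vals cnt).2)) :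
    pass2 ((true, spec) :: pass1 rest') cnt (mOpt vals) (MOpt vals)
      = pack (loopA rest' (parseSetSpecA spec vals cnt).1 (parseSetSpecA spec vals cnt).2) := by
  rw [pass2_set]
  have hs := setFold_eq (splitComma spec) vals cnt
  rw [hs]
  simpa [pack, parseSetSpecA] using ih

-- the main correspondence: B's two passes compute pack of A's loop state
theorem loopA_eq (toks : List String) (vals : List Int) (cnt : Int) :
    pass2 (pass1 toks) cnt (mOpt vals) (MOpt vals) = pack (loopA toks vals cnt) := by
  induction toks, vals, cnt using loopA.induct with
  | case1 vals cnt => simp [pass1, pass2, loopA, pack]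
  | case2 t vals cnt v rest' hcond ih =>
    obtain ⟨rfl, -⟩ := hcond
    rw [pass1_cons_bare _ _ _ (Or.inl rfl), loopA_bare_u,
        show decide (("--unwind" : String) = "--unwindset") = false from by decide]
    exact tail_single v rest' vals cnt ih
  | case3 t vals cnt hcond => exact absurd hcond.2 (by simp)
  | case4 t rest vals cnt hno1 h2 ih =>
    obtain ⟨ht1, ht2⟩ := pfx_unwind_ne t h2
    rw [pass1_cons_pfx_u t rest h2 ht1 ht2, loopA_pfx_u t rest vals cnt hno1 h2]
    exact tail_single (splitEq1 t) rest vals cnt ih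
  | case5 t vals cnt hno2 v rest' hno1 hcond ih =>
    obtain ⟨rfl, -⟩ := hcond
    rw [pass1_cons_bare _ _ _ (Or.inr rfl), loopA_bare_s,
        show decide (("--unwindset" : String) = "--unwindset") = true from by decide]
    exact tail_set v rest' vals cnt ih
  | case6 t vals cnt hno2 hno1 hcond => exact absurd hcond.2 (by simp)
  | case7 t rest vals cnt hno1 hno2 hno3 h4 ih =>
    obtain ⟨ht1, ht2, ht3⟩ := pfx_unwindset_ne t h4
    rw [pass1_cons_pfx_s t rest h4 ht1 ht2 ht3, loopA_pfx_s t rest vals cnt hno1 hno2 hno3 h4]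
    exact tail_set (splitEq1 t) rest vals cnt ih
  | case8 t rest vals cnt hno1 hno2 hno3 hno4 ih =>
    rw [pass1_cons_skip t rest hno1 hno2 hno3 hno4, loopA_skip t rest vals cnt hno1 hno2 hno3 hno4]
    exact ih

-- ===== VERDICT (by name: the statement is the Claim_ definition above) =====
theorem parse_unwind_metrics_spec : Claim_equal_parse_unwind_metrics := by
  intro s _ hpre
  unfold Pre_parse_unwind_metrics at hpre
  have hsome := shlexSplit_isSome s hpre
  unfold Spec_parse_unwind_metrics parse_unwind_metrics parse_unwind_metrics_alt
  cases hs : shlexSplit? s with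
  | none => simp [hs] at hsome
  | some toks =>
    dsimp only
    have h := loopA_eq toks [] 0
    rw [mOpt_nil, MOpt_nil] at h
    rw [h]
    by_cases hp : (loopA toks [] 0).1 = []
    · simp [pack, hp, mOpt_nil, MOpt_nil]
    · simp [pack, mOpt, MOpt, hp]
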